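-- pv_equiv track=rewrite | github.com/yusacetin/xfwaita4 | generate_borders.py | generate_bottom_right
-- ===== SOURCE A (Python) =====
-- DARK = 0
--
-- ACTIVE = 0
--
-- DARK_ACTIVE_BORDER = (62, 62, 62, 255)
--
-- DARK_INACTIVE_BORDER = DARK_ACTIVE_BORDER
--
-- DARK_ACTIVE_PADDING = (53, 53, 53, 255)
--
-- DARK_INACTIVE_PADDING = DARK_ACTIVE_PADDING
--
-- DARK_BORDER_WIDTH = 5
--
-- LIGHT_ACTIVE_BORDER = (255, 255, 255, 255)
--
-- LIGHT_INACTIVE_BORDER = LIGHT_ACTIVE_BORDER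
--
-- LIGHT_ACTIVE_PADDING = (246, 245, 244, 255)
--
-- LIGHT_INACTIVE_PADDING = LIGHT_ACTIVE_PADDING
--
-- LIGHT_BORDER_WIDTH = 5
--
-- CORNER_SPAN = 16
--
-- def generate_bottom_right(variant, mode):
--     width = DARK_BORDER_WIDTH if (variant == DARK) else LIGHT_BORDER_WIDTH
--
--     if (variant == DARK):
--         if (mode == ACTIVE):
--             border = DARK_ACTIVE_BORDER
--             padding = DARK_ACTIVE_PADDING
--         else: # inactive
--             border = DARK_INACTIVE_BORDER
--             padding = DARK_INACTIVE_PADDING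
--     else: # light
--         if (mode == ACTIVE):
--             border = LIGHT_ACTIVE_BORDER
--             padding = LIGHT_ACTIVE_PADDING
--         else: # inactive
--             border = LIGHT_INACTIVE_BORDER
--             padding = LIGHT_INACTIVE_PADDING
--
--     pixels = [[(0,0,0,0) for col in range(CORNER_SPAN)] for row in range(CORNER_SPAN)]
--     for row in range(CORNER_SPAN):
--         for col in range(CORNER_SPAN):
--             if (col == CORNER_SPAN-1):
--                 pixels[row][col] = border
--             elif (row == (CORNER_SPAN-1)):
--                 pixels[row][col] = border
--             elif (col > (CORNER_SPAN-DARK_BORDER_WIDTH-1)):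
--                 pixels[row][col] = padding
--             elif (row > (CORNER_SPAN-DARK_BORDER_WIDTH-1)):
--                 pixels[row][col] = padding
--             else:
--                 pass # leave at transparent
--     return pixels
-- ===== SOURCE B (Python) =====
-- DARK = 0
-- ACTIVE = 0
-- DARK_ACTIVE_BORDER = (62, 62, 62, 255)
-- DARK_INACTIVE_BORDER = DARK_ACTIVE_BORDER
-- DARK_ACTIVE_PADDING = (53, 53, 53, 255)
-- DARK_INACTIVE_PADDING = DARK_ACTIVE_PADDING
-- LIGHT_ACTIVE_BORDER = (255, 255, 255, 255)
-- LIGHT_INACTIVE_BORDER = LIGHT_ACTIVE_BORDER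
-- LIGHT_ACTIVE_PADDING = (246, 245, 244, 255)
-- LIGHT_INACTIVE_PADDING = LIGHT_ACTIVE_PADDING
--
-- def generate_bottom_right(variant, mode):
--     if variant == DARK:
--         border = DARK_ACTIVE_BORDER if mode == ACTIVE else DARK_INACTIVE_BORDER
--         padding = DARK_ACTIVE_PADDING if mode == ACTIVE else DARK_INACTIVE_PADDING
--     else:
--         border = LIGHT_ACTIVE_BORDER if mode == ACTIVE else LIGHT_INACTIVE_BORDER
--         padding = LIGHT_ACTIVE_PADDING if mode == ACTIVE else LIGHT_INACTIVE_PADDING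
--     top = [(0, 0, 0, 0)] * 11 + [padding] * 4 + [border]
--     mid = [padding] * 15 + [border]
--     bottom = [border] * 16
--     return [list(top) for _ in range(11)] + [list(mid) for _ in range(4)] + [bottom]
-- ===== Notes on version B (the rewrite author's own statement) =====
-- stated objective: simpler
-- what changed: B builds the three distinct row shapes (transparent+padding+border, padding+border, all-border) once by list concatenation/replication and assembles the grid from them, instead of A's per-cell elif cascade over all 256 cells.
import Mathlib
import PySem

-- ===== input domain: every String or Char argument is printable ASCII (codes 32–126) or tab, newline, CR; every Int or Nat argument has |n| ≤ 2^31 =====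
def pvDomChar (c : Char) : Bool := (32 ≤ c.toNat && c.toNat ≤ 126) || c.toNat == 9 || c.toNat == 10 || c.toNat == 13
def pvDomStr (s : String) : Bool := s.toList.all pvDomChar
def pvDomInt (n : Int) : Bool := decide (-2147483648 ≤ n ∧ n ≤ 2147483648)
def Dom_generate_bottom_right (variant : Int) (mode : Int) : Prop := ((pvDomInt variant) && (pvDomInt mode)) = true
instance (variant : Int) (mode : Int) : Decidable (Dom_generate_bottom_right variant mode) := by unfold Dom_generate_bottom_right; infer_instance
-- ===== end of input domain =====

-- B replaces A's per-cell elif cascade by building the three row shapes once and replicating them (objective: simpler).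

-- ===== PORT A =====
-- pixels[row][col] = v for row,col drawn from range(16): indices are in range and nonnegative,
-- so List.set on .toNat is exact here.
def pvSetCell (px : List (List (Int × Int × Int × Int))) (row col : Int)
    (v : Int × Int × Int × Int) : List (List (Int × Int × Int × Int)) :=
  px.set row.toNat ((px.getD row.toNat []).set col.toNat v)

def generate_bottom_right (variant : Int) (mode : Int) : List (List (Int × Int × Int × Int)) :=
  let border : Int × Int × Int × Int :=
    if variant = 0 then (if mode = 0 then (62, 62, 62, 255) else (62, 62, 62, 255))
    else (if mode = 0 then (255, 255, 255, 255) else (255, 255, 255, 255))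
  let padding : Int × Int × Int × Int :=
    if variant = 0 then (if mode = 0 then (53, 53, 53, 255) else (53, 53, 53, 255))
    else (if mode = 0 then (246, 245, 244, 255) else (246, 245, 244, 255))
  let pixels := (PySem.List.pyRange 0 16 1).map
    (fun _ => (PySem.List.pyRange 0 16 1).map (fun _ => ((0, 0, 0, 0) : Int × Int × Int × Int)))
  (PySem.List.pyRange 0 16 1).foldl (fun px row =>
    (PySem.List.pyRange 0 16 1).foldl (fun px col =>
      if col = 16 - 1 then pvSetCell px row col border
      else if row = 16 - 1 then pvSetCell px row col border
      else if col > 16 - 5 - 1 then pvSetCell px row col padding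
      else if row > 16 - 5 - 1 then pvSetCell px row col padding
      else px) px) pixels

-- ===== PORT B =====
def generate_bottom_right_alt (variant : Int) (mode : Int) : List (List (Int × Int × Int × Int)) :=
  let border : Int × Int × Int × Int :=
    if variant = 0 then (if mode = 0 then (62, 62, 62, 255) else (62, 62, 62, 255))
    else (if mode = 0 then (255, 255, 255, 255) else (255, 255, 255, 255))
  let padding : Int × Int × Int × Int :=
    if variant = 0 then (if mode = 0 then (53, 53, 53, 255) else (53, 53, 53, 255))
    else (if mode = 0 then (246, 245, 244, 255) else (246, 245, 244, 255))
  let top := List.replicate 11 ((0, 0, 0, 0) : Int × Int × Int × Int) ++ List.replicate 4 padding ++ [border]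
  let mid := List.replicate 15 padding ++ [border]
  let bottom := List.replicate 16 border
  List.replicate 11 top ++ List.replicate 4 mid ++ [bottom]

-- ===== PRECONDITION & SPEC =====
def Spec_generate_bottom_right (variant : Int) (mode : Int) (out : List (List (Int × Int × Int × Int))) : Prop := out = generate_bottom_right_alt variant mode
instance (variant : Int) (mode : Int) (out : List (List (Int × Int × Int × Int))) : Decidable (Spec_generate_bottom_right variant mode out) := by unfold Spec_generate_bottom_right; infer_instance

-- ===== CLAIM (what is proved, stated in full; the proofs are below) =====
def Claim_equal_generate_bottom_right : Prop := ∀ (variant : Int) (mode : Int), Dom_generate_bottom_right variant mode → Spec_generate_bottom_right variant mode (generate_bottom_right variant mode)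

-- ===== LEMMAS AND PROOFS =====
-- Only the truth of 'variant = 0' and 'mode = 0' matters; after fixing those two booleans
-- both sides are closed terms and the kernel evaluates them.
set_option maxRecDepth 8192 in
theorem pv_eq_cases (variant mode : Int) :
    generate_bottom_right variant mode = generate_bottom_right_alt variant mode := by
  by_cases hv : variant = 0 <;> by_cases hm : mode = 0 <;>
    simp only [generate_bottom_right, generate_bottom_right_alt, hv, hm] <;> decide

-- ===== VERDICT (by name: the statement is the Claim_ definition above) =====
theorem generate_bottom_right_spec : Claim_equal_generate_bottom_right := by
  intro variant mode _
  unfold Spec_generate_bottom_right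
  exact pv_eq_cases variant mode
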